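-- pv_equiv track=rewrite | github.com/moon-yongjin/tts | 1-3_ZeroShot_Studio/scripts/1-3-106_ZeroShot_CustomRef.py | num_to_sino
-- ===== SOURCE A (Python) =====
-- def num_to_sino(num):
--     if not num: return ""
--     if isinstance(num, str): num = int(num.replace(',', ''))
--     if num == 0: return '영'
--     digits = ['', '일', '이', '삼', '사', '오', '육', '칠', '팔', '구']; units = ['', '십', '백', '천']; big_units = ['', '만', '억', '조']
--     result, num_str = "", str(num)
--     groups = []
--     while num_str: groups.append(num_str[-4:]); num_str = num_str[:-4]
--     for i, group in enumerate(groups):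
--         group_res = ""
--         for j, d_char in enumerate(reversed(group)):
--             d = int(d_char)
--             if d > 0:
--                 if d == 1 and j > 0: group_res = units[j] + group_res
--                 else: group_res = digits[d] + units[j] + group_res
--         if group_res:
--             if i == 1 and group_res == '일': result = big_units[i] + result
--             else: result = group_res + big_units[i] + result
--     return result
-- ===== SOURCE B (Python) =====
-- _D = ['', '일', '이', '삼', '사', '오', '육', '칠', '팔', '구']
-- _BIG = ['', '만', '억', '조']
--
--
-- def _group(n):
--     # Render 0 < n < 10000 by recursing from the most significant unit down.
--     if n <= 0:
--         return ''
--     if n < 10: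
--         return _D[n]
--     for unit, base in (('천', 1000), ('백', 100), ('십', 10)):
--         if n >= base:
--             d = n // base
--             return (unit if d == 1 else _D[d] + unit) + _group(n % base)
--     return ''
--
--
-- def _big(n, level):
--     # Recurse over base-10000 levels, most significant part first.
--     if n <= 0:
--         return ''
--     high = _big(n // 10000, level + 1)
--     g = _group(n % 10000)
--     if not g:
--         return high
--     if level == 1 and g == '일':
--         return high + '만'
--     return high + g + _BIG[level]
--
--
-- def num_to_sino(num):
--     if not num:
--         return ""
--     if isinstance(num, str):
--         num = int(num.replace(',', ''))
--     if num == 0: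
--         return '영'
--     return _big(num, 0)
-- ===== Notes on version B (the rewrite author's own statement) =====
-- stated objective: alternative
-- what changed: B replaces A's string-based pipeline (chunk str(num) into 4-char groups, scan each chunk's digit chars in reverse, build by prepending) with arithmetic recursion: a base-10000 recursion over the integer attaching the big units by level, with a most-significant-first helper rendering one <10000 group via //1000, //100, //10.
import Mathlib
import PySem

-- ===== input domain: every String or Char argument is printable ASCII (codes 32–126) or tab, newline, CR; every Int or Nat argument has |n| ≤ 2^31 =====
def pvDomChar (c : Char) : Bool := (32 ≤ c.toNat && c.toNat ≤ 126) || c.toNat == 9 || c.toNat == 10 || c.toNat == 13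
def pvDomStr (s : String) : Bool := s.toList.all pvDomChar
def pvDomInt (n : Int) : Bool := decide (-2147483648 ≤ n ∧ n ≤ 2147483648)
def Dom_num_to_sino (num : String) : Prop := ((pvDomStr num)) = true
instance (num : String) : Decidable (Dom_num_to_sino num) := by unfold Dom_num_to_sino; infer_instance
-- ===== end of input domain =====

-- B re-implements the Korean Sino-numeral rendering arithmetically: instead of chunking the
-- decimal STRING of the number and scanning each chunk's digits in reverse, B recurses over
-- base-10000 levels of the integer itself with a most-significant-first helper for one group.
-- Objective: alternative decomposition (similar cost); the proof is about the return value.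

-- ===== PORT A =====
def pvDigitsA : List (List Char) := [[], ['일'], ['이'], ['삼'], ['사'], ['오'], ['육'], ['칠'], ['팔'], ['구']]
def pvUnitsA : List (List Char) := [[], ['십'], ['백'], ['천']]
def pvBigA : List (List Char) := [[], ['만'], ['억'], ['조']]

-- inner loop: for j, d_char in enumerate(reversed(group)), building group_res by prepending
def pvAInner (g : List Char) : List Char :=
  (PySem.List.enumerate g.reverse 0).foldl
    (fun res jd =>
      let d : Int := (PySem.Int.ofChars? [jd.2]).getD 0
      if 0 < d then
        if d = 1 ∧ 0 < jd.1 then PySem.List.pyGetD pvUnitsA jd.1 [] ++ res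
        else PySem.List.pyGetD pvDigitsA d [] ++ PySem.List.pyGetD pvUnitsA jd.1 [] ++ res
      else res) []

-- while num_str: groups.append(num_str[-4:]); num_str = num_str[:-4]   (fuel = length, enough)
def pvAGroupsF : Nat → List Char → List (List Char)
  | 0, _ => []
  | f+1, ns =>
    if ns = [] then []
    else PySem.List.slice ns (some (-4)) none :: pvAGroupsF f (PySem.List.slice ns none (some (-4)))

def pvAGroups (ns : List Char) : List (List Char) := pvAGroupsF ns.length ns

-- for i, group in enumerate(groups): … result = … + result
def pvAOuter (groups : List (List Char)) : List Char :=
  (PySem.List.enumerate groups 0).foldl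
    (fun result ig =>
      let gr := pvAInner ig.2
      if gr ≠ [] then
        if ig.1 = 1 ∧ gr = ['일'] then PySem.List.pyGetD pvBigA ig.1 [] ++ result
        else gr ++ PySem.List.pyGetD pvBigA ig.1 [] ++ result
      else result) []

def num_to_sino (num : String) : String :=
  if num.toList = [] then ""
  else
    match PySem.Int.ofChars? (PySem.Chars.replace num.toList [','] []) with
    | none => ""   -- int() raises ValueError here; excluded by Pre_
    | some n =>
      if n = 0 then "영"
      else String.ofList (pvAOuter (pvAGroups (PySem.Int.toChars n)))

-- ===== PORT B =====
def pvDB : List (List Char) := [[], ['일'], ['이'], ['삼'], ['사'], ['오'], ['육'], ['칠'], ['팔'], ['구']]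
def pvBB : List (List Char) := [[], ['만'], ['억'], ['조']]

-- _group: most-significant-first rendering of one group (fuel 5 always suffices: each
-- recursive call is below a strictly smaller base)
def pvGroupBF : Nat → Int → List Char
  | 0, _ => []
  | f+1, n =>
    if n ≤ 0 then []
    else if n < 10 then PySem.List.pyGetD pvDB n []
    else if 1000 ≤ n then
      (if PySem.Int.floordiv n 1000 = 1 then ['천']
       else PySem.List.pyGetD pvDB (PySem.Int.floordiv n 1000) [] ++ ['천']) ++
        pvGroupBF f (PySem.Int.mod n 1000)
    else if 100 ≤ n then
      (if PySem.Int.floordiv n 100 = 1 then ['백']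
       else PySem.List.pyGetD pvDB (PySem.Int.floordiv n 100) [] ++ ['백']) ++
        pvGroupBF f (PySem.Int.mod n 100)
    else if 10 ≤ n then
      (if PySem.Int.floordiv n 10 = 1 then ['십']
       else PySem.List.pyGetD pvDB (PySem.Int.floordiv n 10) [] ++ ['십']) ++
        pvGroupBF f (PySem.Int.mod n 10)
    else []

-- _big: recursion over base-10000 levels (fuel n.toNat + 1 suffices: n // 10000 < n for n > 0)
def pvBigBF : Nat → Int → Int → List Char
  | 0, _, _ => []
  | f+1, n, level =>
    if n ≤ 0 then []
    else
      let high := pvBigBF f (PySem.Int.floordiv n 10000) (level + 1)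
      let g := pvGroupBF 5 (PySem.Int.mod n 10000)
      if g = [] then high
      else if level = 1 ∧ g = ['일'] then high ++ ['만']
      else high ++ g ++ PySem.List.pyGetD pvBB level []

def pvBigB (n : Int) (level : Int) : List Char := pvBigBF (n.toNat + 1) n level

def num_to_sino_alt (num : String) : String :=
  if num.toList = [] then ""
  else
    match PySem.Int.ofChars? (PySem.Chars.replace num.toList [','] []) with
    | none => ""
    | some n =>
      if n = 0 then "영"
      else String.ofList (pvBigB n 0)

-- ===== PRECONDITION & SPEC =====
-- Pre_ admits exactly the inputs on which A returns: the empty string, and strings whose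
-- comma-stripped content parses as an int n with 0 ≤ n < 10^16 (Python's int() raises
-- ValueError on anything else and again on the sign character of str(n) for negative n,
-- and big_units[i] raises IndexError for n ≥ 10^16).
def Pre_num_to_sino (num : String) : Prop :=
  num.toList = [] ∨
    (0 ≤ (PySem.Int.ofChars? (PySem.Chars.replace num.toList [','] [])).getD (-1) ∧
     (PySem.Int.ofChars? (PySem.Chars.replace num.toList [','] [])).getD (-1) < 10000000000000000)
instance (num : String) : Decidable (Pre_num_to_sino num) := by unfold Pre_num_to_sino; infer_instance

def pvWitness_num_to_sino : String := "12,345"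

def Spec_num_to_sino (num : String) (out : String) : Prop := out = num_to_sino_alt num
instance (num : String) (out : String) : Decidable (Spec_num_to_sino num out) := by unfold Spec_num_to_sino; infer_instance

-- ===== CLAIM (what is proved, stated in full; the proofs are below) =====
def Claim_equal_num_to_sino : Prop := ∀ (num : String), Dom_num_to_sino num → Pre_num_to_sino num → Spec_num_to_sino num (num_to_sino num)

-- ===== LEMMAS AND PROOFS =====

-- proof-only reference: the decimal digit characters of n (what str(n) produces)
def pvDecF : Nat → Nat → List Char
  | 0, _ => []
  | f+1, n => if n < 10 then [Nat.digitChar n] else pvDecF f (n / 10) ++ [Nat.digitChar (n % 10)]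

lemma pvDecF_congr : ∀ f f' n, n < f → n < f' → pvDecF f n = pvDecF f' n := by
  intro f
  induction f with
  | zero => omega
  | succ f ih =>
    intro f' n h h'
    cases f' with
    | zero => omega
    | succ f' =>
      simp only [pvDecF]
      by_cases h10 : n < 10
      · simp [h10]
      · simp only [if_neg h10]
        rw [ih f' (n/10) (by omega) (by omega)]

lemma pvDecF_ne_nil : ∀ f n, n < f → pvDecF f n ≠ [] := by
  intro f
  induction f with
  | zero => omega
  | succ f ih =>
    intro n h
    simp only [pvDecF]
    by_cases h10 : n < 10 <;> simp [h10]

lemma tdc_append : ∀ f n l, Nat.toDigitsCore 10 f n l = Nat.toDigitsCore 10 f n [] ++ l := by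
  intro f
  induction f with
  | zero => intro n l; simp [Nat.toDigitsCore]
  | succ f ih =>
    intro n l
    simp only [Nat.toDigitsCore]
    by_cases h : n / 10 = 0
    · simp [h]
    · simp only [if_neg h]
      rw [ih (n/10) [(n % 10).digitChar], ih (n/10) ((n % 10).digitChar :: l)]
      simp

lemma tdc_eq_dec : ∀ f n, n < f → Nat.toDigitsCore 10 f n [] = pvDecF f n := by
  intro f
  induction f with
  | zero => omega
  | succ f ih =>
    intro n h
    simp only [Nat.toDigitsCore, pvDecF]
    by_cases h10 : n < 10
    · have : n / 10 = 0 := by omega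
      simp [this, h10, Nat.mod_eq_of_lt h10]
    · have : ¬ n / 10 = 0 := by omega
      simp only [if_neg this, if_neg h10]
      rw [tdc_append, ih (n/10) (by omega)]

lemma toChars_eq_dec (n : Nat) : PySem.Int.toChars (n : Int) = pvDecF (n + 1) n := by
  simp only [PySem.Int.toChars]
  rw [if_neg (by omega)]
  simp only [Int.toNat_natCast, Nat.toDigits]
  exact tdc_eq_dec (n+1) n (by omega)
def pvPad4 (m : Nat) : List Char :=
  [Nat.digitChar (m / 1000 % 10), Nat.digitChar (m / 100 % 10), Nat.digitChar (m / 10 % 10), Nat.digitChar (m % 10)]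

lemma dec_step (n : Nat) (h : 10 ≤ n) :
    pvDecF (n + 1) n = pvDecF (n / 10 + 1) (n / 10) ++ [Nat.digitChar (n % 10)] := by
  simp only [pvDecF, if_neg (by omega : ¬ n < 10)]
  rw [pvDecF_congr n (n/10+1) (n/10) (by omega) (by omega)]
  conv_lhs => rw [pvDecF]

lemma dec_chunk (n : Nat) (h : 10000 ≤ n) :
    pvDecF (n + 1) n = pvDecF (n / 10000 + 1) (n / 10000) ++ pvPad4 (n % 10000) := by
  rw [dec_step n (by omega), dec_step (n/10) (by omega), dec_step (n/10/10) (by omega),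
      dec_step (n/10/10/10) (by omega)]
  have e1 : n / 10 / 10 / 10 / 10 = n / 10000 := by omega
  have e2 : n / 10 / 10 / 10 % 10 = n % 10000 / 1000 % 10 := by omega
  have e3 : n / 10 / 10 % 10 = n % 10000 / 100 % 10 := by omega
  have e4 : n / 10 % 10 = n % 10000 / 10 % 10 := by omega
  have e5 : n % 10 = n % 10000 % 10 := by omega
  rw [e1, e2, e3, e4, e5]
  simp [pvPad4]

lemma groupsF_nil : ∀ f, pvAGroupsF f [] = [] := by
  intro f; cases f <;> simp [pvAGroupsF]

lemma groupsF_congr : ∀ f f' ns, ns.length ≤ f → ns.length ≤ f' → pvAGroupsF f ns = pvAGroupsF f' ns := by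
  intro f
  induction f with
  | zero =>
    intro f' ns h h'
    have : ns = [] := by cases ns <;> simp_all
    simp [this, groupsF_nil]
  | succ f ih =>
    intro f' ns h h'
    rcases eq_or_ne ns [] with rfl | hne
    · simp [groupsF_nil]
    · cases f' with
      | zero => have : ns = [] := by cases ns <;> simp_all
                exact absurd this hne
      | succ f' =>
        simp only [pvAGroupsF, if_neg hne]
        rw [PySem.List.slice_to_neg_ofNat ns 4 (by omega)]
        rw [ih f' _ (by simp [List.length_take]; omega) (by simp [List.length_take]; omega)]

lemma groups_small (ns : List Char) (h1 : ns ≠ []) (h2 : ns.length ≤ 4) : pvAGroups ns = [ns] := by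
  have hl : 1 ≤ ns.length := by cases ns <;> simp_all
  unfold pvAGroups
  rw [groupsF_congr ns.length (ns.length - 1 + 1) ns (by omega) (by omega)]
  simp only [pvAGroupsF, if_neg h1]
  rw [PySem.List.slice_from_neg_ofNat ns 4 (by omega), PySem.List.slice_to_neg_ofNat ns 4 (by omega)]
  have e : ns.length - 4 = 0 := by omega
  simp [e, groupsF_nil]
lemma groups_big (n : Nat) (h : 10000 ≤ n) :
    pvAGroups (pvDecF (n + 1) n) = pvPad4 (n % 10000) :: pvAGroups (pvDecF (n / 10000 + 1) (n / 10000)) := by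
  have hc := dec_chunk n h
  set P := pvDecF (n / 10000 + 1) (n / 10000) with hP
  have hPne : P ≠ [] := pvDecF_ne_nil _ _ (by omega)
  have hlen : (pvDecF (n+1) n).length = P.length + 4 := by rw [hc]; simp [pvPad4]
  have hne : pvDecF (n+1) n ≠ [] := pvDecF_ne_nil _ _ (by omega)
  unfold pvAGroups
  rw [groupsF_congr _ (P.length + 4) _ (by omega) (by omega)]
  have h4 : P.length + 4 = (P.length + 3) + 1 := by omega
  rw [h4]
  conv_lhs => rw [pvAGroupsF]
  rw [if_neg hne]
  rw [PySem.List.slice_from_neg_ofNat _ 4 (by omega), PySem.List.slice_to_neg_ofNat _ 4 (by omega)]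
  rw [hlen]
  have e : P.length + 4 - 4 = P.length := by omega
  rw [e, hc]
  rw [List.drop_left, List.take_left]
  rw [groupsF_congr (P.length + 3) P.length P (by omega) (by omega)]

-- proof-only reshaping of A's outer foldl: process groups from index i, later groups prepended
def pvAPart (g : List Char) (i : Int) : List Char :=
  let gr := pvAInner g
  if gr = [] then []
  else if i = 1 ∧ gr = ['일'] then PySem.List.pyGetD pvBigA i []
  else gr ++ PySem.List.pyGetD pvBigA i []

def pvALoop : List (List Char) → Int → List Char
  | [], _ => []
  | g :: t, i => pvALoop t (i + 1) ++ pvAPart g i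

lemma outer_fold (gs : List (List Char)) : ∀ (i : Int) (acc : List Char),
    (PySem.List.enumerate gs i).foldl
      (fun result ig =>
        let gr := pvAInner ig.2
        if gr ≠ [] then
          if ig.1 = 1 ∧ gr = ['일'] then PySem.List.pyGetD pvBigA ig.1 [] ++ result
          else gr ++ PySem.List.pyGetD pvBigA ig.1 [] ++ result
        else result) acc = pvALoop gs i ++ acc := by
  induction gs with
  | nil => intro i acc; simp [PySem.List.enumerate_nil, pvALoop]
  | cons g t ih =>
    intro i acc
    rw [PySem.List.enumerate_cons]
    simp only [List.foldl_cons]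
    rw [ih (i+1)]
    simp only [pvALoop, pvAPart]
    by_cases hgr : pvAInner g = []
    · simp [hgr]
    · by_cases hc : i = 1 ∧ pvAInner g = ['일'] <;> simp [hgr, hc]

lemma outer_eq_loop (gs : List (List Char)) : pvAOuter gs = pvALoop gs 0 := by
  unfold pvAOuter
  rw [outer_fold gs 0 []]
  simp

-- the digit/unit building blocks both renderers produce
def pvU (x : Nat) : List Char := if x = 0 then [] else PySem.List.pyGetD pvDB (x : Int) []
def pvT (x : Nat) (c : Char) : List Char :=
  if x = 0 then [] else if x = 1 then [c] else PySem.List.pyGetD pvDB (x : Int) [] ++ [c]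

lemma gb_step (m base : Nat) (f : Nat) (c : Char)     (h1 : base ≤ m) (h2 : m < 10 * base) :
    (if PySem.Int.floordiv (m : Int) base = 1 then [c]
     else PySem.List.pyGetD pvDB (PySem.Int.floordiv (m : Int) base) [] ++ [c]) ++ pvGroupBF f (PySem.Int.mod (m : Int) base)
    = pvT (m / base) c ++ pvGroupBF f ((m % base : Nat) : Int) := by
  have hb0 : 0 < base := by omega
  rw [show ((base : Int)) = ((base : Nat) : Int) by simp, PySem.Int.floordiv_natCast, PySem.Int.mod_natCast]
  have hd1 : 1 ≤ m / base := Nat.one_le_div_iff hb0 |>.mpr h1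
  by_cases he : m / base = 1
  · rw [if_pos (by exact_mod_cast he)]
    unfold pvT
    rw [if_neg (by omega), if_pos he]
  · rw [if_neg (by exact_mod_cast fun h => he (Nat.cast_injective h))]
    unfold pvT
    rw [if_neg (by omega), if_neg he]

lemma gb1 (f m : Nat) (hf : 1 ≤ f) (h : m < 10) : pvGroupBF f (m : Int) = pvU m := by
  obtain ⟨f, rfl⟩ : ∃ f', f = f' + 1 := ⟨f - 1, by omega⟩
  conv_lhs => rw [pvGroupBF]
  unfold pvU
  rcases Nat.eq_zero_or_pos m with rfl | hm
  · simp
  · rw [if_neg (by omega), if_pos (by exact_mod_cast h), if_neg (by omega)]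

lemma gb2 (f m : Nat) (hf : 2 ≤ f) (h : m < 100) :
    pvGroupBF f (m : Int) = pvT (m / 10) '십' ++ pvU (m % 10) := by
  obtain ⟨f, rfl⟩ : ∃ f', f = f' + 1 := ⟨f - 1, by omega⟩
  by_cases h10 : m < 10
  · have e0 : m / 10 = 0 := by omega
    have e1 : m % 10 = m := by omega
    rw [e0, e1, show pvT 0 '십' = [] by rfl, List.nil_append, ← gb1 (f+1) m (by omega) h10]
  · conv_lhs => rw [pvGroupBF]
    rw [if_neg (by omega), if_neg (by push_cast; omega), if_neg (by push_cast; omega),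
        if_neg (by push_cast; omega), if_pos (by push_cast; omega)]
    rw [show ((10:Int)) = ((10:Nat):Int) by norm_num]
    rw [gb_step m 10 f '십' (by omega) (by omega)]
    rw [gb1 f (m % 10) (by omega) (by omega)]

lemma gb3 (f m : Nat) (hf : 3 ≤ f) (h : m < 1000) :
    pvGroupBF f (m : Int) = pvT (m / 100) '백' ++ pvT (m / 10 % 10) '십' ++ pvU (m % 10) := by
  obtain ⟨f, rfl⟩ : ∃ f', f = f' + 1 := ⟨f - 1, by omega⟩
  by_cases h100 : m < 100
  · have e0 : m / 100 = 0 := by omega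
    have e1 : m / 10 % 10 = m / 10 := by omega
    rw [e0, e1, show pvT 0 '백' = [] by rfl, List.nil_append, ← gb2 (f+1) m (by omega) h100]
  · conv_lhs => rw [pvGroupBF]
    rw [if_neg (by omega), if_neg (by push_cast; omega), if_neg (by push_cast; omega),
        if_pos (by push_cast; omega)]
    rw [show ((100:Int)) = ((100:Nat):Int) by norm_num]
    rw [gb_step m 100 f '백' (by omega) (by omega)]
    rw [gb2 f (m % 100) (by omega) (by omega)]
    have e1 : m % 100 / 10 = m / 10 % 10 := by omega
    have e2 : m % 100 % 10 = m % 10 := by omega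
    rw [e1, e2, List.append_assoc]

lemma gb4 (m : Nat) (h : m < 10000) :
    pvGroupBF 5 (m : Int)
      = pvT (m / 1000) '천' ++ (pvT (m / 100 % 10) '백' ++ (pvT (m / 10 % 10) '십' ++ pvU (m % 10))) := by
  by_cases h1000 : m < 1000
  · have e0 : m / 1000 = 0 := by omega
    have e1 : m / 100 % 10 = m / 100 := by omega
    rw [e0, e1, show pvT 0 '천' = [] by rfl, List.nil_append, ← List.append_assoc,
        ← gb3 5 m (by omega) h1000]
  · conv_lhs => rw [pvGroupBF]
    rw [if_neg (by omega), if_neg (by push_cast; omega), if_pos (by push_cast; omega)]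
    rw [show ((1000:Int)) = ((1000:Nat):Int) by norm_num]
    rw [gb_step m 1000 4 '천' (by omega) (by omega)]
    rw [gb3 4 (m % 1000) (by omega) (by omega)]
    have e1 : m % 1000 / 100 = m / 100 % 10 := by omega
    have e2 : m % 1000 / 10 % 10 = m / 10 % 10 := by omega
    have e3 : m % 1000 % 10 = m % 10 := by omega
    rw [e1, e2, e3, List.append_assoc]
def pvAStep (res : List Char) (jd : Int × Char) : List Char :=
  let d : Int := (PySem.Int.ofChars? [jd.2]).getD 0
  if 0 < d then
    if d = 1 ∧ 0 < jd.1 then PySem.List.pyGetD pvUnitsA jd.1 [] ++ res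
    else PySem.List.pyGetD pvDigitsA d [] ++ PySem.List.pyGetD pvUnitsA jd.1 [] ++ res
  else res

lemma pvAInner_eq (g : List Char) :
    pvAInner g = (PySem.List.enumerate g.reverse 0).foldl pvAStep [] := rfl

lemma parse_digit (x : Nat) (h : x < 10) :
    (PySem.Int.ofChars? [Nat.digitChar x]).getD 0 = (x : Int) := by
  interval_cases x <;> decide

lemma digA : pvDigitsA = pvDB := rfl

lemma ai_step0 (x : Nat) (hx : x < 10) (res : List Char) :
    pvAStep res (0, Nat.digitChar x) = pvU x ++ res := by
  unfold pvAStep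
  simp only [parse_digit x hx]
  rcases Nat.eq_zero_or_pos x with rfl | hpos
  · simp [pvU]
  · rw [if_pos (by exact_mod_cast hpos), if_neg (by simp)]
    unfold pvU
    rw [if_neg (by omega), digA]
    simp [show PySem.List.pyGetD pvUnitsA 0 [] = ([] : List Char) from by decide]

lemma ai_stepj (x : Nat) (hx : x < 10) (j : Int) (c : Char) (hj0 : 0 < j)
    (hj : PySem.List.pyGetD pvUnitsA j [] = [c]) (res : List Char) :
    pvAStep res (j, Nat.digitChar x) = pvT x c ++ res := by
  unfold pvAStep
  simp only [parse_digit x hx]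
  rcases Nat.eq_zero_or_pos x with rfl | hpos
  · simp [pvT]
  · rw [if_pos (by exact_mod_cast hpos)]
    unfold pvT
    by_cases h1 : x = 1
    · subst h1
      rw [if_pos ⟨by norm_num, hj0⟩]
      simp [hj]
    · rw [if_neg (by simp; intro hc; exact absurd (by exact_mod_cast hc : x = 1) h1),
          if_neg (by omega), if_neg h1, hj, digA]

lemma ai1 (x : Nat) (hx : x < 10) : pvAInner [Nat.digitChar x] = pvU x := by
  rw [pvAInner_eq]
  simp only [List.reverse_cons, List.reverse_nil, List.nil_append,
    PySem.List.enumerate_cons, PySem.List.enumerate_nil, List.foldl_cons, List.foldl_nil]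
  rw [ai_step0 x hx]
  simp

lemma ai2 (x1 x0 : Nat) (h1 : x1 < 10) (h0 : x0 < 10) :
    pvAInner [Nat.digitChar x1, Nat.digitChar x0] = pvT x1 '십' ++ pvU x0 := by
  rw [pvAInner_eq]
  simp only [List.reverse_cons, List.reverse_nil, List.nil_append, List.cons_append,
    PySem.List.enumerate_cons, PySem.List.enumerate_nil, List.foldl_cons, List.foldl_nil]
  rw [ai_step0 x0 h0, ai_stepj x1 h1 (0+1) '십' (by omega) (by decide)]
  simp

lemma ai3 (x2 x1 x0 : Nat) (h2 : x2 < 10) (h1 : x1 < 10) (h0 : x0 < 10) :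
    pvAInner [Nat.digitChar x2, Nat.digitChar x1, Nat.digitChar x0]
      = pvT x2 '백' ++ (pvT x1 '십' ++ pvU x0) := by
  rw [pvAInner_eq]
  simp only [List.reverse_cons, List.reverse_nil, List.nil_append, List.cons_append,
    PySem.List.enumerate_cons, PySem.List.enumerate_nil, List.foldl_cons, List.foldl_nil]
  rw [ai_step0 x0 h0, ai_stepj x1 h1 (0+1) '십' (by omega) (by decide),
      ai_stepj x2 h2 (0+1+1) '백' (by omega) (by decide)]
  simp

lemma ai4 (x3 x2 x1 x0 : Nat) (h3 : x3 < 10) (h2 : x2 < 10) (h1 : x1 < 10) (h0 : x0 < 10) :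
    pvAInner [Nat.digitChar x3, Nat.digitChar x2, Nat.digitChar x1, Nat.digitChar x0]
      = pvT x3 '천' ++ (pvT x2 '백' ++ (pvT x1 '십' ++ pvU x0)) := by
  rw [pvAInner_eq]
  simp only [List.reverse_cons, List.reverse_nil, List.nil_append, List.cons_append,
    PySem.List.enumerate_cons, PySem.List.enumerate_nil, List.foldl_cons, List.foldl_nil]
  rw [ai_step0 x0 h0, ai_stepj x1 h1 (0+1) '십' (by omega) (by decide),
      ai_stepj x2 h2 (0+1+1) '백' (by omega) (by decide),
      ai_stepj x3 h3 (0+1+1+1) '천' (by omega) (by decide)]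
  simp
lemma dec1 (m : Nat) (h : m < 10) : pvDecF (m + 1) m = [Nat.digitChar m] := by
  conv_lhs => rw [pvDecF]
  rw [if_pos h]

lemma dec2 (m : Nat) (h1 : 10 ≤ m) (h2 : m < 100) :
    pvDecF (m + 1) m = [Nat.digitChar (m / 10), Nat.digitChar (m % 10)] := by
  rw [dec_step m h1, dec1 (m / 10) (by omega)]
  rfl

lemma dec3 (m : Nat) (h1 : 100 ≤ m) (h2 : m < 1000) :
    pvDecF (m + 1) m = [Nat.digitChar (m / 100), Nat.digitChar (m / 10 % 10), Nat.digitChar (m % 10)] := by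
  rw [dec_step m (by omega), dec2 (m / 10) (by omega) (by omega)]
  have e1 : m / 10 / 10 = m / 100 := by omega
  have e2 : m / 10 % 10 = m / 10 % 10 := rfl
  rw [e1]
  rfl

lemma dec4 (m : Nat) (h1 : 1000 ≤ m) (h2 : m < 10000) :
    pvDecF (m + 1) m = pvPad4 m := by
  rw [dec_step m (by omega), dec3 (m / 10) (by omega) (by omega)]
  have e1 : m / 10 / 100 = m / 1000 % 10 := by omega
  have e2 : m / 10 / 10 % 10 = m / 100 % 10 := by omega
  have e3 : m / 10 % 10 = m / 10 % 10 := rfl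
  rw [e1, e2]
  simp [pvPad4]

lemma inner_pad (m : Nat) (h : m < 10000) : pvAInner (pvPad4 m) = pvGroupBF 5 (m : Int) := by
  unfold pvPad4
  rw [ai4 _ _ _ _ (by omega) (by omega) (by omega) (by omega), gb4 m h]
  have e : m / 1000 % 10 = m / 1000 := by omega
  rw [e]

lemma pvU_ne (x : Nat) (h0 : 0 < x) (h : x < 10) : pvU x ≠ [] := by
  interval_cases x <;> decide

lemma pvT_ne (x : Nat) (h0 : 0 < x) (h : x < 10) (c : Char) : pvT x c ≠ [] := by
  unfold pvT
  rw [if_neg (by omega)]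
  by_cases h1 : x = 1
  · simp [h1]
  · rw [if_neg h1]
    interval_cases x <;> simp_all

lemma gb_ne (m : Nat) (h0 : 0 < m) (h : m < 10000) : pvGroupBF 5 (m : Int) ≠ [] := by
  rw [gb4 m h]
  rcases Nat.eq_zero_or_pos (m % 10) with hz | hp
  · rcases Nat.eq_zero_or_pos (m / 10 % 10) with hz1 | hp1
    · rcases Nat.eq_zero_or_pos (m / 100 % 10) with hz2 | hp2
      · have : 0 < m / 1000 := by omega
        have := pvT_ne (m / 1000) this (by omega) '천'
        simp_all
      · have := pvT_ne _ hp2 (by omega) '백'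
        simp_all
    · have := pvT_ne _ hp1 (by omega) '십'
      simp_all
  · have := pvU_ne _ hp (by omega)
    simp_all

lemma inner_lead (m : Nat) (h1 : 0 < m) (h2 : m < 10000) :
    pvAInner (pvDecF (m + 1) m) = pvGroupBF 5 (m : Int) ∧ (pvDecF (m + 1) m).length ≤ 4 := by
  by_cases c10 : m < 10
  · rw [dec1 m c10]
    refine ⟨?_, by simp⟩
    rw [ai1 m c10, gb4 m h2]
    have e1 : m / 1000 = 0 := by omega
    have e2 : m / 100 % 10 = 0 := by omega
    have e3 : m / 10 % 10 = 0 := by omega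
    have e4 : m % 10 = m := by omega
    rw [e1, e2, e3, e4]
    simp [pvT]
  · by_cases c100 : m < 100
    · rw [dec2 m (by omega) c100]
      refine ⟨?_, by simp⟩
      rw [ai2 _ _ (by omega) (by omega), gb4 m h2]
      have e1 : m / 1000 = 0 := by omega
      have e2 : m / 100 % 10 = 0 := by omega
      have e3 : m / 10 % 10 = m / 10 := by omega
      rw [e1, e2, e3]
      simp [pvT]
    · by_cases c1000 : m < 1000
      · rw [dec3 m (by omega) c1000]
        refine ⟨?_, by simp⟩
        rw [ai3 _ _ _ (by omega) (by omega) (by omega), gb4 m h2]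
        have e1 : m / 1000 = 0 := by omega
        have e2 : m / 100 % 10 = m / 100 := by omega
        rw [e1, e2]
        simp [pvT]
      · rw [dec4 m (by omega) h2]
        exact ⟨inner_pad m h2, by simp [pvPad4]⟩

lemma bigA_eq : pvBigA = pvBB := rfl

lemma bigBF_congr : ∀ f f' (n : Int) l, n.toNat < f → n.toNat < f' → pvBigBF f n l = pvBigBF f' n l := by
  intro f
  induction f with
  | zero => omega
  | succ f ih =>
    intro f' n l h h'
    obtain ⟨f', rfl⟩ : ∃ f'', f' = f'' + 1 := ⟨f' - 1, by omega⟩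
    simp only [pvBigBF]
    by_cases hn : n ≤ 0
    · simp [hn]
    · rw [if_neg hn, if_neg hn]
      have hpos : 0 < n := by omega
      have hdiv : PySem.Int.floordiv n 10000 = n / 10000 :=
        PySem.Int.floordiv_eq_ediv_of_pos (by norm_num)
      have hlt : n / 10000 < n := by omega
      have hge : 0 ≤ n / 10000 := by omega
      rw [hdiv, ih f' (n / 10000) (l + 1) (by omega) (by omega)]

lemma bigBF_zero (f : Nat) (l : Int) : pvBigBF f 0 l = [] := by
  cases f <;> simp [pvBigBF]

lemma main_loop : ∀ n : Nat, ∀ k : Nat, 0 < n → n < 10 ^ (4 * (4 - k)) → k ≤ 3 →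
    pvALoop (pvAGroups (pvDecF (n + 1) n)) (k : Int) = pvBigB (n : Int) (k : Int) := by
  intro n
  induction n using Nat.strong_induction_on with
  | _ n ih =>
    intro k h0 hlt hk
    have hBunfold : pvBigB (n : Int) (k : Int)
        = if (n : Int) ≤ 0 then []
          else
            (if pvGroupBF 5 (PySem.Int.mod (n : Int) 10000) = [] then
              pvBigBF n (PySem.Int.floordiv (n : Int) 10000) ((k : Int) + 1)
             else if (k : Int) = 1 ∧ pvGroupBF 5 (PySem.Int.mod (n : Int) 10000) = ['일'] then
              pvBigBF n (PySem.Int.floordiv (n : Int) 10000) ((k : Int) + 1) ++ ['만']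
             else
              pvBigBF n (PySem.Int.floordiv (n : Int) 10000) ((k : Int) + 1)
                ++ pvGroupBF 5 (PySem.Int.mod (n : Int) 10000) ++ PySem.List.pyGetD pvBB (k : Int) []) := by
      unfold pvBigB
      rw [Int.toNat_natCast]
      conv_lhs => rw [pvBigBF]
    have hmod : PySem.Int.mod (n : Int) 10000 = ((n % 10000 : Nat) : Int) := by
      rw [show ((10000:Int)) = ((10000:Nat):Int) by norm_num, PySem.Int.mod_natCast]
    have hdiv : PySem.Int.floordiv (n : Int) 10000 = ((n / 10000 : Nat) : Int) := by
      rw [show ((10000:Int)) = ((10000:Nat):Int) by norm_num, PySem.Int.floordiv_natCast]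
    by_cases hs : n < 10000
    · obtain ⟨hinner, hlen⟩ := inner_lead n h0 hs
      have hne := pvDecF_ne_nil (n+1) n (by omega)
      rw [groups_small _ hne hlen]
      have hA : pvALoop [pvDecF (n+1) n] (k : Int) = pvAPart (pvDecF (n+1) n) (k : Int) := by
        simp [pvALoop]
      rw [hA, hBunfold, if_neg (by omega)]
      have hmodn : n % 10000 = n := by omega
      rw [hmod, hdiv, hmodn]
      have hdz : n / 10000 = 0 := by omega
      rw [hdz]
      unfold pvAPart
      rw [hinner]
      have hgne := gb_ne n h0 hs
      rw [if_neg hgne, if_neg hgne]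
      simp only [Nat.cast_zero, bigBF_zero, List.nil_append]
      by_cases hk1 : (k : Int) = 1 ∧ pvGroupBF 5 (n : Int) = ['일']
      · rw [if_pos hk1, if_pos hk1]
        obtain ⟨hk1', _⟩ := hk1
        have : k = 1 := by exact_mod_cast hk1'
        subst this
        decide
      · rw [if_neg hk1, if_neg hk1, bigA_eq]
    · have hs' : 10000 ≤ n := by omega
      rw [groups_big n hs']
      have hk2 : k ≤ 2 := by
        by_contra hc
        have : k = 3 := by omega
        subst this
        simp at hlt
        omega
      have hdpos : 0 < n / 10000 := by omega
      have hdlt : n / 10000 < 10 ^ (4 * (4 - (k+1))) := by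
        have hbound : n < 10 ^ (4 * (4 - k)) := hlt
        have e : 4 * (4 - k) = 4 * (4 - (k+1)) + 4 := by omega
        rw [e] at hbound
        have : 10 ^ (4 * (4 - (k+1)) + 4) = 10 ^ (4 * (4 - (k+1))) * 10000 := by ring
        omega
      have hIH := ih (n / 10000) (by omega) (k+1) hdpos hdlt (by omega)
      have hA : pvALoop (pvPad4 (n % 10000) :: pvAGroups (pvDecF (n / 10000 + 1) (n / 10000))) (k : Int)
          = pvALoop (pvAGroups (pvDecF (n / 10000 + 1) (n / 10000))) ((k : Int) + 1)
            ++ pvAPart (pvPad4 (n % 10000)) (k : Int) := rfl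
      rw [hA]
      have hcast : ((k : Int) + 1) = (((k+1 : Nat)) : Int) := by push_cast; ring
      rw [hcast, hIH]
      rw [hBunfold, if_neg (by omega), hmod, hdiv]
      have hBc : pvBigBF n ((n / 10000 : Nat) : Int) (((k:Int)) + 1)
          = pvBigB ((n / 10000 : Nat) : Int) (((k+1 : Nat)) : Int) := by
        rw [hcast]
        unfold pvBigB
        exact bigBF_congr _ _ _ _ (by simp; omega) (by simp)
      rw [hBc]
      unfold pvAPart
      rw [inner_pad (n % 10000) (by omega)]
      by_cases hg : pvGroupBF 5 ((n % 10000 : Nat) : Int) = []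
      · rw [if_pos hg, if_pos hg]
        simp
      · rw [if_neg hg, if_neg hg]
        by_cases hk1 : (k : Int) = 1 ∧ pvGroupBF 5 ((n % 10000 : Nat) : Int) = ['일']
        · rw [if_pos hk1, if_pos hk1]
          obtain ⟨hk1', _⟩ := hk1
          have : k = 1 := by exact_mod_cast hk1'
          subst this
          simp [pvBigA, PySem.List.pyGetD]
        · rw [if_neg hk1, if_neg hk1, bigA_eq]
          simp [List.append_assoc]
lemma top_eq (n : Int) (h1 : 0 ≤ n) (h2 : n < 10000000000000000) (hz : ¬ n = 0) :
    pvAOuter (pvAGroups (PySem.Int.toChars n)) = pvBigB n 0 := by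
  have hn : n = ((n.toNat : Nat) : Int) := (Int.toNat_of_nonneg h1).symm
  rw [outer_eq_loop, hn, toChars_eq_dec n.toNat]
  have := main_loop n.toNat 0 (by omega) (by norm_num; omega) (by omega)
  simpa using this

-- ===== VERDICT (by name: the statement is the Claim_ definition above) =====
theorem num_to_sino_spec : Claim_equal_num_to_sino := by
  intro num _ hpre
  unfold Pre_num_to_sino at hpre
  unfold Spec_num_to_sino num_to_sino num_to_sino_alt
  by_cases hnil : num.toList = []
  · rw [if_pos hnil, if_pos hnil]
  · rw [if_neg hnil, if_neg hnil]
    rcases hcase : PySem.Int.ofChars? (PySem.Chars.replace num.toList [','] []) with _ | n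
    · rfl
    · rcases hpre with h | ⟨hp1, hp2⟩
      · exact absurd h hnil
      · rw [hcase] at hp1 hp2
        simp only [Option.getD_some] at hp1 hp2
        show (if n = 0 then "영" else String.ofList (pvAOuter (pvAGroups (PySem.Int.toChars n))))
          = if n = 0 then "영" else String.ofList (pvBigB n 0)
        by_cases hz : n = 0
        · rw [if_pos hz, if_pos hz]
        · rw [if_neg hz, if_neg hz, top_eq n hp1 hp2 hz]
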